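-- pv_equiv track=rewrite | github.com/DataMarksman/TIL | 2.Algorithm/4. Programmers/[kakao 2021]신규 아이디 추천.py | solution
-- ===== SOURCE A (Python) =====
-- check_set = {'a','b','c','d','e','f','g','h','i','j','k','l','m','n','o','p','q','r','s','t','u','v','w','x','y','z',
--              '0','1','2','3','4','5','6','7','8','9','-','_','.','-',}
--
-- def solution(new_id):
--     new_id = str(new_id).lower()
--     dot_flag = True
--     first_id = ''
--     for first_check in range(len(new_id)):
--         if new_id[first_check] in check_set:
--             if new_id[first_check] == '.':
--                 if dot_flag:
--                     first_id += '.'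
--                     dot_flag = False
--             else:
--                 first_id += new_id[first_check]
--                 dot_flag = True
--     if first_id:
--         if first_id[len(first_id)-1] == '.':
--             first_id = first_id[:len(first_id)-1]
--     if first_id:
--         if first_id[0] == '.':
--             first_id = first_id[1:]
--     if not first_id:
--         first_id = 'a'
--     if len(first_id) >= 16:
--         first_id = first_id[:15]
--         while first_id[len(first_id)-1] == '.':
--             first_id = first_id[:len(first_id)-1]
--     while len(first_id) < 3:
--          first_id += first_id[len(first_id)-1]
--     answer = first_id
--     return answer
-- ===== SOURCE B (Python) =====
-- ALLOWED = set('abcdefghijklmnopqrstuvwxyz0123456789-_.')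
--
-- def solution(new_id):
--     s = str(new_id).lower()
--     s = ''.join(c for c in s if c in ALLOWED)
--     s = ''.join(c for p, c in zip('x' + s, s) if not (p == '.' and c == '.'))
--     s = s.strip('.') or 'a'
--     if len(s) >= 16:
--         s = s[:15].rstrip('.')
--     return s + s[-1] * (3 - len(s))
-- ===== Notes on version B (the rewrite author's own statement) =====
-- stated objective: simpler
-- what changed: A's single index-driven scan carrying a dot_flag plus manual edge trimming loops is replaced by a pipeline of independent whole-string passes: a membership filter, a zip-with-predecessor pass that collapses runs of dots, a strip of boundary dots, truncate-then-rstrip, and arithmetic padding instead of a while loop.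
import Mathlib
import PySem

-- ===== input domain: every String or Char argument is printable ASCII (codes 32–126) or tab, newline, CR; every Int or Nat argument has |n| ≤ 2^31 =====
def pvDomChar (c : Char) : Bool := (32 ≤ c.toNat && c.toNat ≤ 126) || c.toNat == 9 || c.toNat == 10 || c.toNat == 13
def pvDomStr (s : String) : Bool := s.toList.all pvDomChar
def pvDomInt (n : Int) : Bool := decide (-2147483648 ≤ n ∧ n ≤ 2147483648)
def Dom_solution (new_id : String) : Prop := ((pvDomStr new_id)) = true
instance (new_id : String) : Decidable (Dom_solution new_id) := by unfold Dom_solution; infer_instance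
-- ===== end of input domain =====

-- B replaces A's single index-driven scan with a dot flag by a pipeline of whole-string passes
-- (filter, zip-with-predecessor collapse, strip('.'), truncate + rstrip('.'), arithmetic padding); objective: simpler.

-- ===== PORT A =====
-- check_set (a Python set literal; the duplicate '-' is dropped by Set.ofList)
def checkSet : PySem.Set Char := PySem.Set.ofList
  ['a','b','c','d','e','f','g','h','i','j','k','l','m','n','o','p','q','r','s','t','u','v','w','x','y','z',
   '0','1','2','3','4','5','6','7','8','9','-','_','.','-']

-- body of A's for-loop (state: (first_id, dot_flag)), run when the membership test passed
def solACore (acc : List Char × Bool) (c : Char) : List Char × Bool :=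
  if c = '.' then (if acc.2 then (acc.1 ++ ['.'], false) else acc) else (acc.1 ++ [c], true)

-- the two 'if first_id: if first_id[...] == '.': first_id = first_id[...]' statements
def stripEndsA (t : List Char) : List Char :=
  let f1 := if t ≠ [] ∧ PySem.List.pyGetD t ((t.length : Int) - 1) ' ' = '.' then
              PySem.List.slice t none (some ((t.length : Int) - 1)) else t
  if f1 ≠ [] ∧ PySem.List.pyGetD f1 0 ' ' = '.' then
    PySem.List.slice f1 (some 1) none else f1

-- while first_id[len(first_id)-1] == '.': first_id = first_id[:len(first_id)-1]
-- (the 'l ≠ []' conjunct only makes the recursion total; at the call site the list is never empty)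
def stripTrailLoop (l : List Char) : List Char :=
  if h : l ≠ [] ∧ PySem.List.pyGetD l ((l.length : Int) - 1) ' ' = '.' then
    stripTrailLoop (PySem.List.slice l none (some ((l.length : Int) - 1)))
  else l
termination_by l.length
decreasing_by
  have hl : 0 < l.length := List.length_pos_iff.mpr h.1
  rw [PySem.List.slice_to _ (by omega)]
  simp only [List.length_take]
  omega

-- while len(first_id) < 3: first_id += first_id[len(first_id)-1]
def padLoop (l : List Char) : List Char :=
  if l.length < 3 then
    padLoop (l ++ [PySem.List.pyGetD l ((l.length : Int) - 1) ' '])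
  else l
termination_by 3 - l.length
decreasing_by simp; omega

def solution (new_id : String) : String :=
  let s := PySem.Chars.lower new_id.toList
  let p := (PySem.List.pyRange 0 (PySem.List.len s)).foldl
      (fun acc j =>
        if checkSet.contains (PySem.List.pyGetD s j ' ') then solACore acc (PySem.List.pyGetD s j ' ')
        else acc)
      ([], true)
  let f2 := stripEndsA p.1
  let f3 := if f2 = [] then ['a'] else f2
  let f4 := if 16 ≤ f3.length then stripTrailLoop (PySem.List.slice f3 none (some 15)) else f3
  String.ofList (padLoop f4)

-- ===== PORT B =====
def allowedSet : PySem.Set Char := PySem.Set.ofList "abcdefghijklmnopqrstuvwxyz0123456789-_.".toList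

-- hand port of str.rstrip('.') (exact): drop the trailing '.' characters
def rstripDots (l : List Char) : List Char := (l.reverse.dropWhile (fun c => c == '.')).reverse

def solution_alt (new_id : String) : String :=
  let s0 := PySem.Chars.lower new_id.toList
  let s1 := s0.filter (fun c => allowedSet.contains c)
  let s2 := (List.zip ('x' :: s1) s1).filterMap
      (fun pc => if pc.1 = '.' ∧ pc.2 = '.' then none else some pc.2)
  let s3 := PySem.Chars.stripChars s2 ['.']
  let s4 := if s3 = [] then ['a'] else s3
  let s5 := if 16 ≤ s4.length then rstripDots (PySem.List.slice s4 none (some 15)) else s4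
  String.ofList (s5 ++ List.replicate (3 - s5.length) (PySem.List.pyGetD s5 (-1) 'a'))

-- ===== PRECONDITION & SPEC =====
def Spec_solution (new_id : String) (out : String) : Prop := out = solution_alt new_id
instance (new_id : String) (out : String) : Decidable (Spec_solution new_id out) := by unfold Spec_solution; infer_instance

-- ===== CLAIM (what is proved, stated in full; the proofs are below) =====
def Claim_equal_solution : Prop := ∀ (new_id : String), Dom_solution new_id → Spec_solution new_id (solution new_id)

-- ===== LEMMAS AND PROOFS =====

-- reference collapse of consecutive dots; the flag is "the previous kept char was not a dot"
def collapseGo : Bool → List Char → List Char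
  | _, [] => []
  | flag, c :: cs =>
    if c = '.' then (if flag then '.' :: collapseGo false cs else collapseGo false cs)
    else c :: collapseGo true cs

def flagAfter : Bool → List Char → Bool
  | flag, [] => flag
  | _, c :: cs => flagAfter (decide (c ≠ '.')) cs

-- "no two adjacent dots"
def NoDD (l : List Char) : Prop := ¬ ['.', '.'] <:+: l

set_option maxRecDepth 8192 in
theorem checkSet_eq_allowedSet : checkSet = allowedSet := by decide

theorem foldl_solACore (t : List Char) (acc : List Char) (flag : Bool) :
    t.foldl solACore (acc, flag) = (acc ++ collapseGo flag t, flagAfter flag t) := by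
  induction t generalizing acc flag with
  | nil => simp [collapseGo, flagAfter]
  | cons c cs ih =>
    by_cases hc : c = '.'
    · cases flag <;> simp [solACore, collapseGo, flagAfter, hc, ih]
    · simp [solACore, collapseGo, flagAfter, hc, ih]

theorem zip_collapse (cs : List Char) (p : Char) :
    (List.zip (p :: cs) cs).filterMap
      (fun pc => if pc.1 = '.' ∧ pc.2 = '.' then none else some pc.2)
    = collapseGo (decide (p ≠ '.')) cs := by
  induction cs generalizing p with
  | nil => simp [collapseGo]
  | cons c r ih =>
    by_cases hp : p = '.' <;> by_cases hc : c = '.' <;>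
      simp [List.zip_cons_cons, collapseGo, hp, hc, ih]

theorem collapse_false_head (u : List Char) (b : Char) (r : List Char)
    (h : collapseGo false u = b :: r) : b ≠ '.' := by
  induction u generalizing b r with
  | nil => simp [collapseGo] at h
  | cons c cs ih =>
    by_cases hc : c = '.'
    · simp [collapseGo, hc] at h; exact ih _ _ h
    · simp [collapseGo, hc] at h; rw [← h.1]; exact hc

theorem noDD_cons (c : Char) (m : List Char) (h : NoDD m)
    (hh : c = '.' → ∀ x r, m = x :: r → x ≠ '.') : NoDD (c :: m) := by
  intro hin
  rcases List.infix_cons_iff.mp hin with hpre | hinf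
  · rcases List.prefix_cons_iff.mp hpre with h0 | ⟨t, ht, htp⟩
    · simp at h0
    · obtain ⟨hc, ht⟩ : c = '.' ∧ t = ['.'] := by
        constructor
        · have := ht; injection this with h1 h2; exact h1.symm
        · injection ht with h1 h2; exact h2.symm
      subst ht
      rcases htp with ⟨s, hs⟩
      exact hh hc '.' s hs.symm rfl
  · exact h hinf

theorem noDD_collapse (u : List Char) (flag : Bool) : NoDD (collapseGo flag u) := by
  induction u generalizing flag with
  | nil => intro hin; simp [collapseGo] at hin
  | cons c cs ih =>
    by_cases hc : c = '.'
    · cases flag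
      · simpa [collapseGo, hc] using ih false
      · simp only [collapseGo, hc, if_pos]
        apply noDD_cons _ _ (ih false)
        intro _ x r hxr
        exact collapse_false_head cs x r hxr
    · simp only [collapseGo, hc, ite_false]
      apply noDD_cons _ _ (ih true)
      intro hdot; exact absurd hdot hc

theorem noDD_of_infix {l m : List Char} (h : NoDD l) (hm : m <:+: l) : NoDD m :=
  fun hi => h (hi.trans hm)

theorem noDD_reverse {l : List Char} (h : NoDD l) : NoDD l.reverse := by
  intro hin
  exact h (List.reverse_infix.mp hin)

theorem dropWhile_dot (l : List Char) (h : NoDD l) :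
    List.dropWhile (fun c => c == '.') l = if l.head? = some '.' then l.tail else l := by
  match l with
  | [] => simp
  | c :: r =>
    by_cases hc : c = '.'
    · subst hc
      simp only [List.dropWhile_cons, beq_self_eq_true, if_pos, List.head?_cons, List.tail_cons]
      match r with
      | [] => simp
      | x :: r' =>
        have hx : x ≠ '.' := by
          intro hx; subst hx
          exact h (List.IsPrefix.isInfix ⟨r', rfl⟩)
        simp [hx]
    · simp [hc]

theorem pyGetD_last (l : List Char) (hne : l ≠ []) (d : Char) :
    PySem.List.pyGetD l ((l.length : Int) - 1) d = l.getLast hne := by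
  have hl : 0 < l.length := List.length_pos_iff.mpr hne
  have : ((l.length : Int) - 1) = ((l.length - 1 : Nat) : Int) := by omega
  rw [this, PySem.List.pyGetD_natCast]
  rw [List.getD_eq_getElem?_getD]
  rw [List.getElem?_eq_getElem (by omega)]
  simp [List.getLast_eq_getElem]

theorem slice_dropLast (l : List Char) (hne : l ≠ []) :
    PySem.List.slice l none (some ((l.length : Int) - 1)) = l.dropLast := by
  have hl : 0 < l.length := List.length_pos_iff.mpr hne
  rw [PySem.List.slice_to _ (by omega), List.dropLast_eq_take]
  congr 1
  omega

theorem rstrip_char (l : List Char) (h : NoDD l) :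
    rstripDots l = if l.getLast? = some '.' then l.dropLast else l := by
  unfold rstripDots
  rw [dropWhile_dot l.reverse (noDD_reverse h)]
  rcases eq_or_ne l [] with rfl | hne
  · simp
  · rw [List.head?_reverse]
    by_cases hl : l.getLast? = some '.'
    · simp [hl, List.tail_reverse]
    · simp [hl]

theorem getLast?_dropLast_ne (l : List Char) (h : NoDD l) (hl : l.getLast? = some '.') :
    l.dropLast.getLast? ≠ some '.' := by
  intro hd
  rcases List.getLast?_eq_some_iff.mp hd with ⟨m, hm⟩
  rcases List.getLast?_eq_some_iff.mp hl with ⟨m', hm'⟩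
  have hdl : l.dropLast = m' := by rw [hm']; simp
  have : l = m ++ ['.', '.'] := by
    rw [hm', ← hdl, hm]; simp
  exact h (by rw [this]; exact ⟨m, [], by simp⟩)

theorem stripTrail_char (l : List Char) (h : NoDD l) :
    stripTrailLoop l = if l.getLast? = some '.' then l.dropLast else l := by
  rw [stripTrailLoop]
  rcases eq_or_ne l [] with rfl | hne
  · simp
  · rw [pyGetD_last l hne, slice_dropLast l hne]
    have hsome : l.getLast? = some (l.getLast hne) := List.getLast?_eq_some_getLast hne
    by_cases hl : l.getLast hne = '.'
    · rw [dif_pos ⟨hne, hl⟩, stripTrailLoop]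
      rcases eq_or_ne l.dropLast [] with hnil | hdne
      · rw [dif_neg (by simp [hnil]), hnil]
        simp [hsome, hl]
      · rw [pyGetD_last l.dropLast hdne]
        have hne2 : l.dropLast.getLast hdne ≠ '.' := by
          intro hx
          exact getLast?_dropLast_ne l h (by rw [hsome, hl])
            (by rw [List.getLast?_eq_some_getLast hdne, hx])
        rw [dif_neg (by simp [hne2])]
        simp [hsome, hl]
    · rw [dif_neg (by simp [hl])]
      have : l.getLast? ≠ some '.' := by rw [hsome]; simpa using hl
      simp [this]

theorem stripTrail_eq_rstrip (l : List Char) (h : NoDD l) :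
    stripTrailLoop l = rstripDots l := by
  rw [stripTrail_char l h, rstrip_char l h]

theorem contains_dot_eq : (fun c => (['.'] : List Char).contains c) = (fun c => c == '.') := by
  funext c
  simp only [List.contains_cons, List.contains_nil, Bool.or_false]

theorem stripChars_dot (t : List Char) (h : NoDD t) :
    PySem.Chars.stripChars t ['.']
    = (let u1 := if t.head? = some '.' then t.tail else t;
       if u1.getLast? = some '.' then u1.dropLast else u1) := by
  show (List.dropWhile (fun c => (['.'] : List Char).contains c)
          (List.dropWhile (fun c => (['.'] : List Char).contains c) t).reverse).reverse = _
  rw [contains_dot_eq, dropWhile_dot t h]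
  by_cases hh : t.head? = some '.'
  · rw [if_pos hh]
    have h2 : NoDD t.tail := noDD_of_infix h (List.tail_suffix t).isInfix
    rw [dropWhile_dot _ (noDD_reverse h2), List.head?_reverse]
    by_cases hg : t.tail.getLast? = some '.'
    · simp [hg, List.tail_reverse]
    · simp [hg]
  · rw [if_neg hh]
    rw [dropWhile_dot _ (noDD_reverse h), List.head?_reverse]
    by_cases hg : t.getLast? = some '.'
    · simp [hg, List.tail_reverse]
    · simp [hg]

theorem strip_eq (t : List Char) (h : NoDD t) :
    stripEndsA t = PySem.Chars.stripChars t ['.'] := by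
  rw [stripChars_dot t h]
  unfold stripEndsA
  show (if _ then _ else _) = _
  rcases eq_or_ne t [] with rfl | hne
  · simp
  · rcases List.eq_nil_or_concat t.dropLast with hnil | ⟨m, b, hmb⟩
    · -- t is a singleton [c]
      obtain ⟨c, rfl⟩ : ∃ c, t = [c] := by
        rcases t with _ | ⟨c, r⟩
        · exact absurd rfl hne
        · rcases r with _ | ⟨x, r'⟩
          · exact ⟨c, rfl⟩
          · simp at hnil
      rw [pyGetD_last [c] (by simp), slice_dropLast [c] (by simp)]
      by_cases hc : c = '.'
      · subst hc; simp
      · simp [List.getLast, hc, PySem.List.pyGetD, PySem.List.pyGet?, PySem.List.pyIdx?]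
    · -- length ≥ 2 : t = a :: m2 ++ [b2]
      obtain ⟨a, mid, rfl⟩ := List.exists_cons_of_ne_nil hne
      obtain ⟨m2, b2, rfl⟩ : ∃ m2 b2, mid = m2 ++ [b2] := by
        rcases List.eq_nil_or_concat mid with rfl | ⟨m2, b2, h2⟩
        · simp at hmb
        · exact ⟨m2, b2, by simpa [List.concat_eq_append] using h2⟩
      have hsplit : a :: (m2 ++ [b2]) = (a :: m2) ++ [b2] := by simp
      rw [pyGetD_last _ hne, slice_dropLast _ hne]
      have hgl2 : (a :: (m2 ++ [b2])).getLast? = some b2 := by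
        rw [hsplit, List.getLast?_concat]
      have hgl : (a :: (m2 ++ [b2])).getLast hne = b2 := by
        have h' := List.getLast?_eq_some_getLast hne
        rw [hgl2] at h'
        injection h' with h''
        exact h''.symm
      have hdl : (a :: (m2 ++ [b2])).dropLast = a :: m2 := by
        rw [hsplit, List.dropLast_concat]
      rw [hgl, hdl]
      rcases eq_or_ne b2 '.' with rfl | hb
      · rcases eq_or_ne a '.' with rfl | ha
        · simp [PySem.List.pyGetD_zero_cons, PySem.List.slice_from_one]
        · simp [ha, hgl2, hdl, PySem.List.pyGetD_zero_cons]
      · rcases eq_or_ne a '.' with rfl | ha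
        · simp [hb, PySem.List.pyGetD_zero_cons, PySem.List.slice_from_one]
        · simp [ha, hb, hgl2, PySem.List.pyGetD_zero_cons]

theorem pad_eq (l : List Char) (hne : l ≠ []) :
    padLoop l = l ++ List.replicate (3 - l.length) (PySem.List.pyGetD l (-1) 'a') := by
  rw [PySem.List.pyGetD_neg_one l 'a' hne]
  match l with
  | [a] => simp [padLoop, PySem.List.pyGetD, PySem.List.pyGet?, PySem.List.pyIdx?, List.getLast]
  | [a, b] => simp [padLoop, PySem.List.pyGetD, PySem.List.pyGet?, PySem.List.pyIdx?, List.getLast]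
  | a :: b :: c :: r =>
    rw [padLoop]
    simp [List.getLast, Nat.sub_eq_zero_of_le]

theorem noDD_stripChars (t : List Char) (h : NoDD t) :
    NoDD (PySem.Chars.stripChars t ['.']) := by
  unfold PySem.Chars.stripChars
  apply noDD_reverse
  apply noDD_of_infix (noDD_reverse (noDD_of_infix h (List.dropWhile_suffix _).isInfix))
  exact (List.dropWhile_suffix _).isInfix

theorem noDD_a : NoDD ['a'] := by
  intro h
  have := h.length_le
  simp at this

theorem main_eq (new_id : String) : solution new_id = solution_alt new_id := by
  unfold solution solution_alt
  dsimp only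
  rw [PySem.List.foldl_pyRange_zero_pyGetD (PySem.Chars.lower new_id.toList) ' '
        (fun acc c => if checkSet.contains c then solACore acc c else acc) ([], true),
      PySem.List.foldl_if_eq_foldl_filter (fun c => checkSet.contains c) solACore,
      foldl_solACore, checkSet_eq_allowedSet, zip_collapse]
  set u := (PySem.Chars.lower new_id.toList).filter (fun c => allowedSet.contains c) with hu
  simp only [List.nil_append]
  have hcg : (decide ('x' ≠ '.')) = true := by decide
  rw [hcg]
  set t := collapseGo true u with ht
  have hDD : NoDD t := noDD_collapse u true
  rw [strip_eq t hDD]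
  set s3 := PySem.Chars.stripChars t ['.'] with hs3
  have hDD3 : NoDD s3 := noDD_stripChars t hDD
  set s4 : List Char := if s3 = [] then ['a'] else s3 with hs4
  have hDD4 : NoDD s4 := by
    rw [hs4]; split
    · exact noDD_a
    · exact hDD3
  have hne4 : s4 ≠ [] := by
    rw [hs4]; split
    · simp
    · assumption
  have hsl : PySem.List.slice s4 none (some 15) = s4.take 15 := by
    rw [PySem.List.slice_to _ (by norm_num)]
    rfl
  have hDDt : NoDD (s4.take 15) := noDD_of_infix hDD4 (List.take_prefix 15 s4).isInfix
  rw [hsl, stripTrail_eq_rstrip _ hDDt]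
  set s5 : List Char := if 16 ≤ s4.length then rstripDots (s4.take 15) else s4 with hs5
  have hne5 : s5 ≠ [] := by
    rw [hs5]; split
    · rename_i hlen
      rw [rstrip_char _ hDDt]
      have hl15 : (s4.take 15).length = 15 := by
        rw [List.length_take]; omega
      split
      · intro hnil
        have hld : (s4.take 15).dropLast.length = (s4.take 15).length - 1 :=
          List.length_dropLast
        rw [hnil] at hld
        simp [hl15] at hld
      · intro hnil; rw [hnil] at hl15; simp at hl15
    · exact hne4
  rw [pad_eq s5 hne5]

-- ===== VERDICT (by name: the statement is the Claim_ definition above) =====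
theorem solution_spec : Claim_equal_solution := by
  intro new_id _
  unfold Spec_solution
  exact main_eq new_id
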